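-- pv_equiv track=rewrite | github.com/kyngskwk/solving-problems | other/2019 Kakao blind/04. 무지의 먹방 라이브.py | solution
-- ===== SOURCE A (Python) =====
-- def solution(food_times, k):
--     length = len(food_times)
--     food_dict = {}
--     food_sort = []
--
--     for idx in range(len(food_times)):
--         food_dict[idx + 1] = food_times[idx]
--
--     food_sort = sorted(food_dict.items(), key=lambda item: item[1])
--
--     idx = 0
--     mins = food_sort[idx][1] * length
--     # 어떤 접시가 0개가 될 때 까지 최대바퀴를 한번에 뺌
--     while mins <= k:
--         now_min = food_sort[idx][1]  # 현재 min 값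
--         k -= mins
--         cnt = food_times.count(now_min)
--         idx += cnt
--         length -= cnt  # 남은 접시의 수
--
--         if length <= 0:
--             return -1
--
--         mins = (food_sort[idx][1] - now_min) * length  # 그 다음 작은 값으로 반복
--
--     food_sort = sorted(food_sort[idx:], key=lambda x: x[0])
--
--     if k == 0:
--         return food_sort[0][0]
--
--     elif k < len(food_sort):
--         return food_sort[k][0]
--
--     else:
--         final = k % len(food_sort)
--         return food_sort[final][0]
-- ===== SOURCE B (Python) =====
-- def solution(food_times, k):
--     n = len(food_times)
--     asc = sorted(food_times)
--     # cost to level every plate down to value asc[i] is prefix-sum + asc[i]*(n-i),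
--     # a closed form per position; find the first position whose cost exceeds k.
--     prefix = 0
--     j = n
--     for i in range(n):
--         if prefix + asc[i] * (n - i) > k:
--             j = i
--             break
--         prefix += asc[i]
--     if j == n:
--         return -1
--     rem = k if j == 0 else k - prefix - asc[j - 1] * (n - j)
--     survivors = [p for p, t in enumerate(food_times, 1) if t >= asc[j]]
--     return survivors[rem % len(survivors)]
-- ===== Notes on version B (the rewrite author's own statement) =====
-- stated objective: faster
-- what changed: B sorts the bare times once and evaluates the closed-form cost prefix_sum + asc[i]*(n-i) at each position of that single sorted array (no pair/dict construction, no greedy level-up simulation, no count() rescans, no run skipping), then obtains the surviving plates by filtering the original list in index order (no second sort) and answers with one modular index instead of A's three branches.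
import Mathlib
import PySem

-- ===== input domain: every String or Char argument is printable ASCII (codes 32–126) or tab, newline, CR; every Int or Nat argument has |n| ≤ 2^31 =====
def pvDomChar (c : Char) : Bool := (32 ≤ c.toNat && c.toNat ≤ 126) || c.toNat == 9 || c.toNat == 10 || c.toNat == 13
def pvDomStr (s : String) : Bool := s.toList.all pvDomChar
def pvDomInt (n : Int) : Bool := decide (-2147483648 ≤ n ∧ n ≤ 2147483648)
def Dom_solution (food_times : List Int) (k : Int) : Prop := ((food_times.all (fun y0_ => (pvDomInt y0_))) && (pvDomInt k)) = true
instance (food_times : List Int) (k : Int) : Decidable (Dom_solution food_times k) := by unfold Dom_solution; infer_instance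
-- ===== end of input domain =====

-- B sorts the bare times once and evaluates the closed-form per-position cost
-- pfx_sum + asc[i]*(n-i) in a single scan (no pair sorting loop with count() rescans),
-- then picks the answer from the original list filtered in index order (objective: faster).

-- ===== PORT A =====
-- the `while mins <= k` loop of A; fuel = len(food_times)+1 iterations always suffice
def loopA (food_times : List Int) (food_sort : List (Int × Int)) :
    Nat → Int → Int → Int → Int → Int
  | 0, _, _, _, _ => -2
  | fuel+1, idx, k, length, mins =>
    if mins ≤ k then
      let now_min := (PySem.List.pyGetD food_sort idx (0, 0)).2
      let k' := k - mins
      let cnt : Int := (PySem.List.count food_times now_min : Int)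
      let idx' := idx + cnt
      let length' := length - cnt
      if length' ≤ 0 then -1
      else loopA food_times food_sort fuel idx' k' length'
        (((PySem.List.pyGetD food_sort idx' (0, 0)).2 - now_min) * length')
    else
      let fs2 := PySem.List.sorted (PySem.List.slice food_sort (some idx) none) (fun x => x.1) false
      if k = 0 then (PySem.List.pyGetD fs2 0 (0, 0)).1
      else if k < (fs2.length : Int) then (PySem.List.pyGetD fs2 k (0, 0)).1
      else (PySem.List.pyGetD fs2 (PySem.Int.mod k (fs2.length : Int)) (0, 0)).1

def solution (food_times : List Int) (k : Int) : Int :=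
  let length : Int := (food_times.length : Int)
  let food_dict := (PySem.List.pyRange 0 (food_times.length : Int) 1).foldl
      (fun d idx => d.insert (idx + 1) (PySem.List.pyGetD food_times idx 0)) PySem.Dict.empty
  let food_sort := PySem.List.sorted food_dict.items (fun item => item.2) false
  let mins := (PySem.List.pyGetD food_sort 0 (0, 0)).2 * length
  loopA food_times food_sort (food_times.length + 1) 0 k length mins

-- ===== PORT B =====
-- B's `for i in range(n): if pfx + asc[i]*(n-i) > k: j=i; break; pfx += asc[i]`,
-- returning (j, pfx) with j = n when the loop never breaks; fuel = steps left until n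
def scanB (asc : List Int) (n k : Int) : Nat → Int → Int → Int × Int
  | 0, _i, pfx => (n, pfx)
  | rem+1, i, pfx =>
    if pfx + (PySem.List.pyGetD asc i 0) * (n - i) > k then (i, pfx)
    else scanB asc n k rem (i + 1) (pfx + PySem.List.pyGetD asc i 0)

-- B's code after the scan (the tail of Source B, factored as a helper of the pair (j, pfx))
def selectB (food_times : List Int) (k n : Int) (asc : List Int) (jp : Int × Int) : Int :=
  if jp.1 = n then -1
  else
    let rem := if jp.1 = 0 then k else k - jp.2 - (PySem.List.pyGetD asc (jp.1 - 1) 0) * (n - jp.1)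
    let survivors := ((PySem.List.enumerate food_times 1).filter
        (fun p => decide ((PySem.List.pyGetD asc jp.1 0) ≤ p.2))).map (fun p => p.1)
    PySem.List.pyGetD survivors (PySem.Int.mod rem (survivors.length : Int)) 0

def solution_alt (food_times : List Int) (k : Int) : Int :=
  let n : Int := (food_times.length : Int)
  let asc := PySem.List.sorted food_times (fun x => x) false
  selectB food_times k n asc (scanB asc n k asc.length 0 0)

-- ===== PRECONDITION & SPEC =====
-- Pre_ excludes exactly the inputs on which A raises IndexError: the empty list, and k so
-- negative that the eating loop never runs (min(food_times)*len > k) yet k < -len, where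
-- A's final food_sort[k] is out of range.
def Pre_solution (food_times : List Int) (k : Int) : Prop :=
  food_times ≠ [] ∧
    (-(food_times.length : Int) ≤ k ∨
      ((PySem.List.min? food_times (fun x => x)).getD 0) * (food_times.length : Int) ≤ k)
instance (food_times : List Int) (k : Int) : Decidable (Pre_solution food_times k) := by
  unfold Pre_solution; infer_instance
def pvWitness_solution : List Int × Int := ([3, 1, 2], 5)

def Spec_solution (food_times : List Int) (k : Int) (out : Int) : Prop :=
  out = solution_alt food_times k
instance (food_times : List Int) (k : Int) (out : Int) : Decidable (Spec_solution food_times k out) := by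
  unfold Spec_solution; infer_instance

-- ===== CLAIM (what is proved, stated in full; the proofs are below) =====
def Claim_equal_solution : Prop := ∀ (food_times : List Int) (k : Int),
  Dom_solution food_times k → Pre_solution food_times k →
    Spec_solution food_times k (solution food_times k)

-- ===== LEMMAS AND PROOFS =====

lemma pyGetD_append_length {α : Type} (P : List α) (x : α) (rest : List α)
    (d : α) : PySem.List.pyGetD (P ++ x :: rest) (P.length : Int) d = x := by
  rw [PySem.List.pyGetD_eq_getElem _ _ (by positivity)
      (by simp only [List.length_append, List.length_cons]; push_cast; omega)]
  simp [List.getElem_append_right (Nat.le_refl P.length)]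

lemma pyGetD_append_head {α : Type} (P T : List α) (hT : T ≠ []) (d : α) :
    PySem.List.pyGetD (P ++ T) (P.length : Int) d = T.head hT := by
  obtain ⟨h, t, rfl⟩ := List.exists_cons_of_ne_nil hT
  simpa using pyGetD_append_length P h t d

lemma pyGetD_append_getLast {α : Type} (X Y : List α) (hX : X ≠ []) (d : α) :
    PySem.List.pyGetD (X ++ Y) ((X.length : Int) - 1) d = X.getLast hX := by
  have hpos : 0 < X.length := List.length_pos_iff.mpr hX
  rw [show (X.length : Int) - 1 = ((X.length - 1 : Nat) : Int) by omega]
  rw [PySem.List.pyGetD_eq_getElem _ _ (by positivity)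
      (by simp only [Int.toNat_natCast, List.length_append]; omega)]
  simp only [Int.toNat_natCast]
  rw [List.getElem_append_left (by omega), List.getLast_eq_getElem]

-- the run decomposition of the sorted suffix
lemma run_decomp (P T : List (Int × Int)) (hT : T ≠ [])
    (hsort : ((P ++ T).map (fun p => p.2)).Pairwise (· ≤ ·))
    (hpref : ∀ p ∈ P, p.2 < (T.head hT).2) :
    ∃ R T', T = R ++ T' ∧ 0 < R.length ∧
      (∀ p ∈ R, p.2 = (T.head hT).2) ∧
      (∀ p ∈ T', (T.head hT).2 < p.2) ∧
      List.count ((T.head hT).2) (((P ++ T).map (fun p => p.2))) = R.length := by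
  obtain ⟨h, t, rfl⟩ := List.exists_cons_of_ne_nil hT
  simp only [List.head_cons] at hpref ⊢
  set v := h.2 with hv
  set R := List.takeWhile (fun p : Int × Int => p.2 == v) (h :: t) with hR
  set T' := List.dropWhile (fun p : Int × Int => p.2 == v) (h :: t) with hT'
  have hsplit : h :: t = R ++ T' := (List.takeWhile_append_dropWhile).symm
  have hmemR : ∀ p ∈ R, p.2 = v := fun p hp => by
    simpa using List.mem_takeWhile_imp hp
  have hsortT : ((h :: t).map (fun p : Int × Int => p.2)).Pairwise (· ≤ ·) :=
    hsort.sublist ((List.sublist_append_right P (h :: t)).map _)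
  have hheadle : ∀ p ∈ h :: t, v ≤ p.2 := by
    intro p hp
    rcases List.mem_cons.mp hp with hph | hpt
    · subst hph; exact le_refl _
    · exact (List.pairwise_cons.mp (by simpa using hsortT)).1 p.2 (List.mem_map_of_mem hpt)
  have hRne : R ≠ [] := by
    simp [hR, List.takeWhile_cons, hv]
  have hmemT' : ∀ p ∈ T', v < p.2 := by
    intro p hp
    have hT'ne : T' ≠ [] := by rintro h0; rw [h0] at hp; simp at hp
    have hhead : (((T'.head hT'ne).2 : Int) == v) = false := List.head_dropWhile_not _ hT'ne
    have hheadne : (T'.head hT'ne).2 ≠ v := by simpa using hhead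
    have hheadmem : T'.head hT'ne ∈ h :: t := by
      rw [hsplit]; exact List.mem_append_right _ (List.head_mem _)
    have hheadgt : v < (T'.head hT'ne).2 := lt_of_le_of_ne (hheadle _ hheadmem) (Ne.symm hheadne)
    obtain ⟨h', t', hht'⟩ := List.exists_cons_of_ne_nil hT'ne
    rw [hht'] at hp
    rcases List.mem_cons.mp hp with hph | hpt
    · subst hph; simpa [hht'] using hheadgt
    · have hsub : T'.Sublist (h :: t) := by rw [hsplit]; exact List.sublist_append_right R T'
      have hsortT' : (T'.map (fun p : Int × Int => p.2)).Pairwise (· ≤ ·) :=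
        hsortT.sublist (hsub.map _)
      have hle := (List.pairwise_cons.mp (by simpa [hht'] using hsortT')).1 p.2 (List.mem_map_of_mem hpt)
      have hh : v < h'.2 := by simpa [hht'] using hheadgt
      omega
  refine ⟨R, T', hsplit, List.length_pos_iff.mpr hRne, hmemR, hmemT', ?_⟩
  have hcP : List.count v (P.map (fun p => p.2)) = 0 := by
    rw [List.count_eq_zero]
    intro hmem
    obtain ⟨p, hp, hpv⟩ := List.mem_map.mp hmem
    have := hpref p hp; omega
  have hcT' : List.count v (T'.map (fun p => p.2)) = 0 := by
    rw [List.count_eq_zero]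
    intro hmem
    obtain ⟨p, hp, hpv⟩ := List.mem_map.mp hmem
    have := hmemT' p hp; omega
  have hcR : List.count v (R.map (fun p => p.2)) = R.length := by
    rw [← List.length_map (f := fun p : Int × Int => p.2) (as := R), List.count_eq_length]
    intro b hb
    obtain ⟨p, hp, hpv⟩ := List.mem_map.mp hb
    have := hmemR p hp
    simp [← hpv, this]
  rw [hsplit]
  simp only [List.map_append, List.count_append, hcP, hcR, hcT']
  omega

lemma enumerate_shift (xs : List Int) : ∀ s : Int,
    PySem.List.enumerate xs (s + 1) = (PySem.List.enumerate xs s).map (fun p => (p.1 + 1, p.2)) := by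
  induction xs with
  | nil => intro s; simp [PySem.List.enumerate_nil]
  | cons x t ih => intro s; simp [PySem.List.enumerate_cons, ih]

lemma dict_items_eq (ft : List Int) :
    ((PySem.List.pyRange 0 (ft.length : Int) 1).foldl
      (fun d idx => d.insert (idx + 1) (PySem.List.pyGetD ft idx 0)) PySem.Dict.empty).items
      = PySem.List.enumerate ft 1 := by
  rw [PySem.Dict.items_foldl_insert_fresh _ (fun idx => idx + 1) _ _
      (fun a _ => PySem.Dict.contains_empty _)
      ((PySem.List.nodup_pyRange_one 0 (ft.length : Int)).map (fun a b h => by omega))]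
  have h0 : PySem.List.enumerate ft 0
      = (PySem.List.pyRange 0 (PySem.List.len ft) 1).map (fun j => (j, PySem.List.pyGetD ft j 0)) :=
    PySem.List.enumerate_eq_map_pyRange ft 0
  have h1 : (1 : Int) = 0 + 1 := by norm_num
  rw [h1, enumerate_shift, h0]
  simp [PySem.List.len, List.map_map, Function.comp_def, PySem.Dict.empty, PySem.Dict.items]

lemma map_fst_sorted (xs : List (Int × Int)) :
    (PySem.List.sorted xs (fun p => p.1) false).map (fun p => p.1)
      = PySem.List.sorted (xs.map (fun p => p.1)) (fun x => x) false := by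
  have hp1 : ((PySem.List.sorted xs (fun p => p.1) false).map (fun p => p.1)).Perm
      (xs.map (fun p => p.1)) := (PySem.List.sorted_perm xs (fun p => p.1) false).map _
  have hp2 : (PySem.List.sorted (xs.map (fun p => p.1)) (fun x => x) false).Perm
      (xs.map (fun p => p.1)) := PySem.List.sorted_perm _ _ _
  exact (hp1.trans hp2.symm).eq_of_pairwise (fun a b _ _ h1 h2 => le_antisymm h1 h2)
    (PySem.List.sorted_map_key_pairwise xs (fun p => p.1))
    (PySem.List.sorted_pairwise (xs.map (fun p => p.1)) (fun x => x))

-- A's branchy final selection equals one modular pyGetD into the sorted index list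
lemma finish_eq (P T : List (Int × Int)) (k : Int) (hT : T ≠ [])
    (hk : -(T.length : Int) ≤ k) :
    (let fs2 := PySem.List.sorted (PySem.List.slice (P ++ T) (some (P.length : Int)) none)
        (fun x => x.1) false
     if k = 0 then (PySem.List.pyGetD fs2 0 (0, 0)).1
     else if k < (fs2.length : Int) then (PySem.List.pyGetD fs2 k (0, 0)).1
     else (PySem.List.pyGetD fs2 (PySem.Int.mod k (fs2.length : Int)) (0, 0)).1)
      = PySem.List.pyGetD (PySem.List.sorted (T.map (fun p => p.1)) (fun x => x) false)
          (PySem.Int.mod k ((PySem.List.sorted (T.map (fun p => p.1)) (fun x => x) false).length : Int)) 0 := by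
  have hsl : PySem.List.slice (P ++ T) (some (P.length : Int)) none = T := by
    rw [PySem.List.slice_from_natCast, List.drop_left]
  set fs2 := PySem.List.sorted T (fun x : Int × Int => x.1) false with hfs2
  have hrem : PySem.List.sorted (T.map (fun p => p.1)) (fun x => x) false
      = fs2.map (fun p => p.1) := (map_fst_sorted T).symm
  have hlen : fs2.length = T.length := PySem.List.length_sorted ..
  have hL : 0 < T.length := List.length_pos_iff.mpr hT
  have hLI : (0 : Int) < (T.length : Int) := by exact_mod_cast hL
  have eqAt : ∀ m : Nat, m < T.length →
      (PySem.List.pyGetD fs2 (m : Int) (0, 0)).1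
        = PySem.List.pyGetD (fs2.map (fun p => p.1)) (m : Int) 0 := by
    intro m hm
    have hm' : m < fs2.length := by omega
    rw [PySem.List.pyGetD_eq_getElem _ _ (by positivity) (by exact_mod_cast hm'),
        PySem.List.pyGetD_eq_getElem _ _ (by positivity) (by simp only [List.length_map]; exact_mod_cast hm')]
    simp
  simp only [hsl, ← hfs2, hrem, List.length_map, hlen]
  split_ifs with h0 hlt
  · subst h0
    have : PySem.Int.mod 0 (T.length : Int) = ((0 : Nat) : Int) := by
      rw [PySem.Int.mod_eq_emod_of_pos hLI]; simp
    rw [this]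
    exact eqAt 0 hL
  · by_cases hk0 : 0 ≤ k
    · have : PySem.Int.mod k (T.length : Int) = k := by
        rw [PySem.Int.mod_eq_emod_of_pos hLI, Int.emod_eq_of_lt hk0 (by simpa [hlen] using hlt)]
      rw [this]
      have hkn : k = ((k.toNat : Nat) : Int) := by omega
      rw [hkn]
      exact eqAt k.toNat (by omega)
    · have hmod : PySem.Int.mod k (T.length : Int) = k + (T.length : Int) := by
        rw [PySem.Int.mod_eq_emod_of_pos hLI]
        rw [show k % (T.length : Int) = (k + T.length) % (T.length : Int) from (Int.add_mul_emod_self_left (a := k) (b := (T.length : Int)) (c := 1)).symm.trans (by ring_nf)]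
        exact Int.emod_eq_of_lt (by omega) (by omega)
      rw [hmod]
      have hkn : k + (T.length : Int) = (((k + T.length).toNat : Nat) : Int) := by omega
      rw [hkn]
      rw [← eqAt (k + T.length).toNat (by omega)]
      have hmpos : 0 < (-k).toNat := by omega
      have hmle : (-k).toNat ≤ fs2.length := by omega
      have hknn : k = -(((-k).toNat : Nat) : Int) := by omega
      rw [hknn] at hk ⊢
      rw [PySem.List.pyGetD_neg_natCast _ _ _ hmpos hmle,
          PySem.List.pyGetD_eq_getElem _ _ (by positivity) (by exact_mod_cast (by omega : (-(((-k).toNat : Nat) : Int)+T.length).toNat < fs2.length))]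
      have hidx : ((-(((-k).toNat : Nat) : Int) + T.length).toNat : Nat) = fs2.length - (-k).toNat := by omega
      exact congrArg Prod.fst (getElem_congr rfl hidx.symm (by omega))
  · have hmnn : 0 ≤ PySem.Int.mod k (T.length : Int) := PySem.Int.mod_nonneg k hLI
    have hmlt : PySem.Int.mod k (T.length : Int) < (T.length : Int) := PySem.Int.mod_lt k hLI
    have hkn : PySem.Int.mod k (T.length : Int) = (((PySem.Int.mod k (T.length : Int)).toNat : Nat) : Int) := by omega
    rw [hkn]
    exact eqAt _ (by omega)

-- B's scan walks through a whole run of equal values whose position-cost is within budget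
lemma scanB_run (n k v : Int) : ∀ (Rv : List Int), (∀ x ∈ Rv, x = v) →
    ∀ (X Y : List Int) (rest : Nat) (pfx : Int),
    pfx + v * (n - (X.length : Int)) ≤ k →
    scanB (X ++ Rv ++ Y) n k (Rv.length + rest) (X.length : Int) pfx
      = scanB (X ++ Rv ++ Y) n k rest ((X.length : Int) + (Rv.length : Int)) (pfx + v * (Rv.length : Int)) := by
  intro Rv
  induction Rv with
  | nil => intro _ X Y rest pfx _; simp
  | cons r Rv' ih =>
    intro hall X Y rest pfx hcost
    have hrv : r = v := hall r List.mem_cons_self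
    subst hrv
    have hget : PySem.List.pyGetD (X ++ (r :: Rv') ++ Y) (X.length : Int) 0 = r := by
      have := pyGetD_append_length X r (Rv' ++ Y) 0
      simpa using this
    rw [show (r :: Rv').length + rest = (Rv'.length + rest) + 1 by simp; omega]
    rw [scanB, if_neg (by rw [hget]; omega)]
    have harr : (X ++ [r]) ++ Rv' ++ Y = X ++ (r :: Rv') ++ Y := by simp
    have hlX : ((X ++ [r]).length : Int) = (X.length : Int) + 1 := by simp
    have := ih (fun x hx => hall x (List.mem_cons_of_mem _ hx)) (X ++ [r]) Y rest (pfx + r)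
      (by rw [hlX]; have : r * (n - ((X.length : Int) + 1)) = r * (n - (X.length : Int)) - r := by ring
          omega)
    rw [harr, hlX] at this
    rw [hget, this]
    congr 1
    · simp only [List.length_cons]; push_cast; ring
    · simp only [List.length_cons]; push_cast; ring

-- main loop lemma: A's loop from an intermediate state equals B's scan-then-select
lemma loop_eq (ft : List Int) (k : Int) (S : List (Int × Int))
    (hperm : S.Perm (PySem.List.enumerate ft 1))
    (hsort : (S.map (fun p => p.2)).Pairwise (· ≤ ·)) :
    ∀ (fuel : Nat) (P T : List (Int × Int)) (hT : T ≠ []) (κ prev : Int),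
      S = P ++ T →
      T.length < fuel →
      (∀ p ∈ P, p.2 < (T.head hT).2) →
      (P = [] → prev = 0) →
      (∀ hP : P ≠ [], (P.getLast hP).2 = prev) →
      κ = k - ((P.map (fun p => p.2)).sum) - prev * (T.length : Int) →
      (-(T.length : Int) ≤ κ ∨ ((T.head hT).2 - prev) * (T.length : Int) ≤ κ) →
      loopA ft S fuel (P.length : Int) κ (T.length : Int)
          (((T.head hT).2 - prev) * (T.length : Int))
        = selectB ft k (S.length : Int) (S.map (fun p => p.2))
            (scanB (S.map (fun p => p.2)) (S.length : Int) k T.length (P.length : Int)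
              ((P.map (fun p => p.2)).sum) ) := by
  intro fuel
  induction fuel with
  | zero => intro P T hT κ prev hS hfuel _ _ _ _ _; omega
  | succ fuel ih =>
    intro P T hT κ prev hS hfuel hpref hP0 hPlast hκ hk
    set v := (T.head hT).2 with hv
    set asc := S.map (fun p => p.2) with hasc
    have hget : PySem.List.pyGetD S (P.length : Int) (0, 0) = T.head hT := by
      rw [hS]; exact pyGetD_append_head P T hT (0, 0)
    have hascget : PySem.List.pyGetD asc (P.length : Int) 0 = v := by
      have : asc = P.map (fun p => p.2) ++ T.map (fun p => p.2) := by
        rw [hasc, hS, List.map_append]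
      rw [this, show (P.length : Int) = ((P.map (fun p => p.2)).length : Int) by simp]
      rw [pyGetD_append_head _ _ (by simp [hT]) 0]
      rw [List.head_map]
    have hlenS : S.length = P.length + T.length := by rw [hS]; simp
    have hTpos : 0 < T.length := List.length_pos_iff.mpr hT
    -- the loop/scan condition equivalence
    have hcond : ((v - prev) * (T.length : Int) ≤ κ)
        ↔ ((P.map (fun p => p.2)).sum + v * ((S.length : Int) - (P.length : Int)) ≤ k) := by
      have hnmi : (S.length : Int) - (P.length : Int) = (T.length : Int) := by
        push_cast [hlenS]; omega
      rw [hnmi, hκ]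
      constructor <;> intro h <;> nlinarith [h]
    rw [loopA]
    by_cases hle : (v - prev) * (T.length : Int) ≤ κ
    · -- loop continues
      rw [if_pos hle]
      simp only [hget, ← hv]
      obtain ⟨R, T', hsplit, hRpos, hmemR, hmemT', hcount⟩ := run_decomp P T hT (hS ▸ hsort) hpref
      rw [← hS, ← hv] at hcount
      have hcnt : (PySem.List.count ft v : Int) = (R.length : Int) := by
        have h1 : List.count v ft = List.count v (S.map (fun p => p.2)) := by
          have h2 : (S.map (fun p => p.2)).Perm ((PySem.List.enumerate ft 1).map (fun p => p.2)) :=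
            hperm.map _
          rw [PySem.List.map_snd_enumerate] at h2
          exact (h2.count_eq v).symm
        rw [PySem.List.count_eq, h1, hcount]
      rw [hcnt]
      have harr : S = (P ++ R) ++ T' := by rw [hS, hsplit, List.append_assoc]
      have hlenT : T.length = R.length + T'.length := by rw [hsplit]; simp
      -- B's scan steps through the run
      have hascarr : asc = (P.map (fun p => p.2)) ++ (R.map (fun p => p.2)) ++ (T'.map (fun p => p.2)) := by
        rw [hasc, harr]; simp
      have hscan : scanB asc (S.length : Int) k T.length (P.length : Int) ((P.map (fun p => p.2)).sum)
          = scanB asc (S.length : Int) k T'.length ((P.length : Int) + (R.length : Int))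
              ((P.map (fun p => p.2)).sum + v * (R.length : Int)) := by
        have hrun := scanB_run (S.length : Int) k v (R.map (fun p => p.2))
          (by intro x hx; obtain ⟨p, hp, rfl⟩ := List.mem_map.mp hx; exact hmemR p hp)
          (P.map (fun p => p.2)) (T'.map (fun p => p.2)) T'.length
          ((P.map (fun p => p.2)).sum)
          (by have := hcond.mp hle
              simpa using this)
        rw [← hascarr] at hrun
        rw [show T.length = (R.map (fun p : Int × Int => p.2)).length + T'.length by
              simp [hlenT]]
        rw [show ((P.map (fun p : Int × Int => p.2)).length : Int) = (P.length : Int) by simp] at hrun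
        rw [hrun]
        congr 1 <;> simp
      rw [hscan]
      by_cases hT'nil : T' = []
      · -- everything eaten: A returns -1; B's scan runs out (j = n)
        have hT'len : T'.length = 0 := by rw [hT'nil]; rfl
        rw [if_pos (show (T.length : Int) - (R.length : Int) ≤ 0 by push_cast [hlenT, hT'len]; omega)]
        rw [show T'.length = 0 from hT'len]
        rw [scanB, selectB, if_pos rfl]
      · have hT'pos : 0 < T'.length := List.length_pos_iff.mpr hT'nil
        rw [if_neg (show ¬ ((T.length : Int) - (R.length : Int) ≤ 0) by push_cast [hlenT]; omega)]
        have hidx : (P.length : Int) + (R.length : Int) = (((P ++ R).length : Nat) : Int) := by simp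
        have hlen' : (T.length : Int) - (R.length : Int) = ((T'.length : Nat) : Int) := by
          push_cast [hlenT]; ring
        have hget' : PySem.List.pyGetD S ((((P ++ R).length : Nat)) : Int) (0, 0)
            = T'.head hT'nil := by
          rw [harr]; exact pyGetD_append_head (P ++ R) T' hT'nil (0, 0)
        rw [hidx, hlen', hget']
        have hRne : R ≠ [] := List.length_pos_iff.mp hRpos
        have hPR : P ++ R ≠ [] := by
          intro h0
          exact hRne (List.append_eq_nil_iff.mp h0).2
        have hsum2 : ((P ++ R).map (fun p => p.2)).sum
            = (P.map (fun p => p.2)).sum + v * (R.length : Int) := by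
          rw [List.map_append, List.sum_append]
          congr 1
          have hallv : ∀ x ∈ R.map (fun p : Int × Int => p.2), x = v := by
            intro x hx; obtain ⟨p, hp, rfl⟩ := List.mem_map.mp hx
            exact hmemR p hp
          rw [List.sum_eq_card_nsmul _ v hallv]
          simp [mul_comm]
        have := ih (P ++ R) T' hT'nil (κ - (v - prev) * (T.length : Int)) v harr
          (by omega)
          (by intro p hp
              have h2 := hmemT' _ (List.head_mem hT'nil)
              rcases List.mem_append.mp hp with hpP | hpR
              · have h1 := hpref p hpP
                omega
              · have h1 := hmemR p hpR
                omega)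
          (fun h => absurd h hPR)
          (by intro hPn
              rw [List.getLast_append_of_right_ne_nil P R hRne]
              exact hmemR _ (List.getLast_mem _))
          (by rw [hsum2, hκ]
              push_cast [hlenT]
              ring)
          (Or.inl (by have h0 : 0 ≤ κ - (v - prev) * (T.length : Int) := by omega
                      have : (0:Int) ≤ (T'.length : Int) := by positivity
                      omega))
        rw [this, hsum2,
          show ((P ++ R).length : Int) = (P.length : Int) + (R.length : Int) by
            rw [List.length_append]; push_cast; ring]
    · -- loop breaks: A selects; B's scan stops here with (j, pfx) = (|P|, sumP)
      rw [if_neg hle]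
      obtain ⟨t, ht⟩ : ∃ t, T.length = t + 1 := ⟨T.length - 1, by omega⟩
      have hc : (List.map (fun p => p.2) P).sum
          + PySem.List.pyGetD asc ((P.length : Nat) : Int) 0 * ((S.length : Int) - ((P.length : Nat) : Int)) > k := by
        rw [hascget]
        have := (not_iff_not.mpr hcond).mp hle
        omega
      rw [ht, scanB, if_pos hc]
      have hPltn : ((P.length : Nat) : Int) ≠ ((S.length : Nat) : Int) := by
        intro h
        have : P.length = S.length := by exact_mod_cast h
        omega
      simp only [selectB]
      rw [if_neg hPltn]
      -- the remaining budget B computes equals κ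
      have hrem : (if (P.length : Int) = 0 then k
          else k - (P.map (fun p => p.2)).sum
            - (PySem.List.pyGetD asc ((P.length : Int) - 1) 0) * ((S.length : Int) - (P.length : Int)))
          = κ := by
        by_cases hPnil : P = []
        · rw [if_pos (by simp [hPnil]), hκ, hP0 hPnil]
          simp [hPnil]
        · rw [if_neg (by simpa using fun h => hPnil (List.length_eq_zero_iff.mp h))]
          have hlast : PySem.List.pyGetD asc ((P.length : Int) - 1) 0 = prev := by
            have hmP : P.map (fun p : Int × Int => p.2) ≠ [] := by simpa using hPnil
            have : asc = P.map (fun p => p.2) ++ T.map (fun p => p.2) := by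
              rw [hasc, hS, List.map_append]
            rw [this, show (P.length : Int) - 1 = ((P.map (fun p : Int × Int => p.2)).length : Int) - 1 by simp]
            rw [pyGetD_append_getLast _ _ hmP 0]
            rw [show (P.map (fun p : Int × Int => p.2)).getLast hmP
                = (P.getLast hPnil).2 from List.getLast_map _]
            exact hPlast hPnil
          rw [hlast, hκ]
          have : (S.length : Int) - (P.length : Int) = (T.length : Int) := by
            push_cast [hlenS]; omega
          rw [this]
        -- done
      rw [hrem, hascget]
      -- survivors = map fst of the index-sorted suffix
      have hTall : ∀ p ∈ T, v ≤ p.2 := by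
        intro p hp
        have hsortPT : ((P ++ T).map (fun p : Int × Int => p.2)).Pairwise (· ≤ ·) := by
          rw [← hS]; exact hsort
        obtain ⟨h, t', rfl⟩ := List.exists_cons_of_ne_nil hT
        have hsortT : ((h :: t').map (fun p : Int × Int => p.2)).Pairwise (· ≤ ·) :=
          hsortPT.sublist ((List.sublist_append_right P _).map _)
        rcases List.mem_cons.mp hp with rfl | hpt
        · exact le_refl _
        · exact (List.pairwise_cons.mp (by simpa using hsortT)).1 p.2 (List.mem_map_of_mem hpt)
      have hfiltS : S.filter (fun p => decide (v ≤ p.2)) = T := by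
        rw [hS, List.filter_append]
        rw [List.filter_eq_nil_iff.mpr (by intro p hp; simpa using not_le.mpr (hpref p hp)),
            List.filter_eq_self.mpr (by intro p hp; simpa using hTall p hp)]
        simp
      have hsurv : PySem.List.sorted (T.map (fun p => p.1)) (fun x => x) false
          = ((PySem.List.enumerate ft 1).filter (fun p => decide (v ≤ p.2))).map (fun p => p.1) := by
        apply PySem.List.sorted_id_eq_of_perm_of_pairwise
        · exact ((hperm.filter _).symm.map _).trans (by rw [hfiltS])
        · have henum : ((PySem.List.enumerate ft 1).map (fun p => p.1)).Pairwise (· < ·) := by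
            have := PySem.List.pairwise_lt_enumerate ft (s := 1)
            exact this.map _ (fun a b h => h)
          have hsub : (((PySem.List.enumerate ft 1).filter (fun p => decide (v ≤ p.2))).map (fun p => p.1)).Sublist
              ((PySem.List.enumerate ft 1).map (fun p => p.1)) :=
            List.Sublist.map _ List.filter_sublist
          exact (henum.sublist hsub).imp le_of_lt
      rw [← hsurv]
      have hκk : -(T.length : Int) ≤ κ := by
        rcases hk with h | h
        · exact h
        · exact absurd h hle
      rw [hS]
      simpa using finish_eq P T κ hT hκk

-- ===== VERDICT (by name: the statement is the Claim_ definition above) =====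
theorem solution_spec : Claim_equal_solution := by
  intro ft k _ hpre
  obtain ⟨hne, hk⟩ := hpre
  unfold Spec_solution solution solution_alt
  simp only [dict_items_eq]
  set S := PySem.List.sorted (PySem.List.enumerate ft 1) (fun p => p.2) false with hSdef
  have hSlen : S.length = ft.length := by
    rw [hSdef, PySem.List.length_sorted, PySem.List.length_enumerate]
  have hSne : S ≠ [] := by
    rw [hSdef]
    rw [Ne, PySem.List.sorted_eq_nil_iff]
    intro h
    have := congrArg (List.map (fun p : Int × Int => p.2)) h
    rw [PySem.List.map_snd_enumerate] at this
    simp at this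
    exact hne this
  have hperm : S.Perm (PySem.List.enumerate ft 1) := PySem.List.sorted_perm _ _ _
  have hsort : (S.map (fun p => p.2)).Pairwise (· ≤ ·) :=
    PySem.List.sorted_map_key_pairwise (PySem.List.enumerate ft 1) (fun p => p.2)
  -- B's sorted value list is the value column of A's sorted pair list
  have hascS : PySem.List.sorted ft (fun x => x) false = S.map (fun p => p.2) := by
    apply PySem.List.sorted_id_eq_of_perm_of_pairwise
    · exact (hperm.map _).trans (by rw [PySem.List.map_snd_enumerate])
    · exact hsort
  have hget0 : PySem.List.pyGetD S 0 (0, 0) = S.head hSne := by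
    have := pyGetD_append_head [] S hSne (0, 0)
    simpa using this
  have hmin : (PySem.List.min? ft (fun x => x)).getD 0 = (S.head hSne).2 := by
    obtain ⟨m, hm⟩ : ∃ m, PySem.List.min? ft (fun x => x) = some m := by
      cases hmm : PySem.List.min? ft (fun x => x) with
      | none => exact absurd ((PySem.List.min?_eq_none_iff ft (fun x : Int => x)).mp hmm) hne
      | some m => exact ⟨m, rfl⟩
    rw [hm, Option.getD_some]
    have hmmem : m ∈ ft := PySem.List.min?_mem hm
    have hmmin : ∀ y ∈ ft, m ≤ y := PySem.List.min?_isMin hm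
    have hS0 : S = S.head hSne :: S.tail := (List.cons_head_tail hSne).symm
    have hle1 : (S.head hSne).2 ≤ m := by
      have hall : ∀ y ∈ PySem.List.enumerate ft 1, (S.head hSne).2 ≤ y.2 :=
        PySem.List.key_head_sorted_le (PySem.List.enumerate ft 1)
          (fun p : Int × Int => p.2) hS0
      obtain ⟨p, hp, hpm⟩ : ∃ p ∈ PySem.List.enumerate ft 1, p.2 = m := by
        have : m ∈ (PySem.List.enumerate ft 1).map (fun p => p.2) := by
          rw [PySem.List.map_snd_enumerate]; exact hmmem
        obtain ⟨p, hp, hpm⟩ := List.mem_map.mp this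
        exact ⟨p, hp, hpm⟩
      have h3 : (S.head hSne).2 ≤ p.2 := hall p hp
      omega
    have hle2 : m ≤ (S.head hSne).2 := by
      apply hmmin
      have hh0 : S.head hSne ∈ S := List.head_mem hSne
      have : (S.head hSne).2 ∈ (PySem.List.enumerate ft 1).map (fun p => p.2) :=
        List.mem_map_of_mem (hperm.subset hh0)
      rw [PySem.List.map_snd_enumerate] at this
      exact this
    omega
  have hmain := loop_eq ft k S hperm hsort (ft.length + 1) [] S hSne k 0 rfl (by omega)
    (by intro p hp; simp at hp)
    (fun _ => rfl)
    (by intro hP; simp at hP)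
    (by simp)
    (by rcases hk with h | h
        · left; rw [hSlen]; exact h
        · right; rw [hSlen, ← hmin]; simpa using h)
  simp only [List.length_nil, Nat.cast_zero, List.map_nil, List.sum_nil] at hmain
  rw [hSlen] at hmain
  rw [hget0,
    show (S.head hSne).2 * (ft.length : Int) = ((S.head hSne).2 - 0) * (ft.length : Int) by ring,
    hmain, hascS]
  congr 1
  rw [show (S.map (fun p => p.2)).length = ft.length by rw [List.length_map, hSlen]]
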